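-- pv_equiv track=rewrite | github.com/Comida-For-Familias-Inc/LambdaTrip | src/image_processor/app.py | extract_location_from_labels
-- ===== SOURCE A (Python) =====
-- def extract_location_from_labels(labels):
--     """
--     Extract location information from image labels
--     """
--     location_keywords = [
--         "landmark", "monument", "building", "architecture", "city", "town",
--         "mountain", "beach", "forest", "park", "garden", "museum", "temple",
--         "church", "mosque", "palace", "castle", "bridge", "tower"
--     ]
--
--     for label in labels:
--         description = label.get('description', '').lower()
--         if any(keyword in description for keyword in location_keywords):
--             return {
--                 "city": None,
--                 "country": None,
--                 "description": description
--             }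
--
--     return None
-- ===== SOURCE B (Python) =====
-- _LOCATION_KEYWORDS = [
--     "landmark", "monument", "building", "architecture", "city", "town",
--     "mountain", "beach", "forest", "park", "garden", "museum", "temple",
--     "church", "mosque", "palace", "castle", "bridge", "tower"
-- ]
--
--
-- def _has_location_keyword(description):
--     # single left-to-right position scan: at each index test whether any
--     # keyword starts there (naive multi-pattern matcher), instead of one
--     # full substring-containment scan per keyword
--     for i in range(len(description)):
--         for keyword in _LOCATION_KEYWORDS:
--             if description.startswith(keyword, i):
--                 return True
--     return False
--
--
-- def extract_location_from_labels(labels):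
--     # staged pipeline instead of one explicit loop with early return:
--     # lower every description, then pick the first matching one, then wrap it
--     descriptions = (label.get('description', '').lower() for label in labels)
--     match = next((d for d in descriptions if _has_location_keyword(d)), None)
--     if match is None:
--         return None
--     return {"city": None, "country": None, "description": match}
-- ===== Notes on version B (the rewrite author's own statement) =====
-- stated objective: alternative
-- what changed: B is a staged pipeline (map every label to its lowered description, find the first one matching, then wrap it) instead of A's explicit loop with early return, and the match test is a single left-to-right position scan testing whether any keyword starts at each index instead of A's per-keyword substring-containment loop.
import Mathlib
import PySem

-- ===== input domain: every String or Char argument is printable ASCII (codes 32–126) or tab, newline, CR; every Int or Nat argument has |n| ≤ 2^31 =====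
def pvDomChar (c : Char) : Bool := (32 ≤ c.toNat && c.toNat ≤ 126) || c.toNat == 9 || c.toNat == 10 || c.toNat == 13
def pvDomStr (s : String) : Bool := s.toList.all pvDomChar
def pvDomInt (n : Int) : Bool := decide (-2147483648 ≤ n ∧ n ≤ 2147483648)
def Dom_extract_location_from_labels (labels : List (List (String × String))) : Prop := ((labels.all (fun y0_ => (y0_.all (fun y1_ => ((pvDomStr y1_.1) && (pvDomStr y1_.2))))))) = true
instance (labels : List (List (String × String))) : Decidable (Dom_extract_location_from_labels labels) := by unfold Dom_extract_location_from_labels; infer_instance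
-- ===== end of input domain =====

-- B is a staged pipeline (map to lowered descriptions, find? the first match, wrap it)
-- instead of A's explicit early-return loop, with a single position-scan multi-pattern
-- match test instead of A's per-keyword containment loop (objective: alternative, same value).


-- ===== PORT A =====
def locationKeywordsA : List String :=
  ["landmark", "monument", "building", "architecture", "city", "town",
   "mountain", "beach", "forest", "park", "garden", "museum", "temple",
   "church", "mosque", "palace", "castle", "bridge", "tower"]

def extract_location_from_labels (labels : List (List (String × String))) : Option (List (String × Option String)) :=
  match labels with
  | [] => none
  | label :: rest =>
    -- description = label.get('description', '').lower()
    let description := PySem.Str.lower (PySem.Dict.getD (PySem.Dict.mk label) "description" "")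
    -- any(keyword in description for keyword in location_keywords)
    if locationKeywordsA.any (fun keyword => PySem.Str.isIn keyword description) then
      some [("city", none), ("country", none), ("description", some description)]
    else
      extract_location_from_labels rest

-- ===== PORT B =====
def locationKeywordsB : List String :=
  ["landmark", "monument", "building", "architecture", "city", "town",
   "mountain", "beach", "forest", "park", "garden", "museum", "temple",
   "church", "mosque", "palace", "castle", "bridge", "tower"]

-- _has_location_keyword: for i in range(len(description)): for keyword in …:
--   if description.startswith(keyword, i): return True
-- description.startswith(keyword, i) with 0 ≤ i is exactly keyword.toList.isPrefixOf (description.toList.drop i)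
def hasLocationKeyword (description : String) : Bool :=
  (List.range description.toList.length).any (fun i =>
    locationKeywordsB.any (fun keyword => keyword.toList.isPrefixOf (description.toList.drop i)))

-- lowered description of one label (the mapped stage of the pipeline)
def loweredDescription (label : List (String × String)) : String :=
  PySem.Str.lower (PySem.Dict.getD (PySem.Dict.mk label) "description" "")

def extract_location_from_labels_alt (labels : List (List (String × String))) : Option (List (String × Option String)) :=
  ((labels.map loweredDescription).find? hasLocationKeyword).map
    (fun d => [("city", none), ("country", none), ("description", some d)])

-- ===== PRECONDITION & SPEC =====
def Spec_extract_location_from_labels (labels : List (List (String × String))) (out : Option (List (String × Option String))) : Prop := out = extract_location_from_labels_alt labels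
instance (labels : List (List (String × String))) (out : Option (List (String × Option String))) : Decidable (Spec_extract_location_from_labels labels out) := by unfold Spec_extract_location_from_labels; infer_instance

-- ===== CLAIM (what is proved, stated in full; the proofs are below) =====
def Claim_equal_extract_location_from_labels : Prop := ∀ (labels : List (List (String × String))), Dom_extract_location_from_labels labels → Spec_extract_location_from_labels labels (extract_location_from_labels labels)

-- ===== LEMMAS AND PROOFS =====

-- a nonempty pattern is an infix iff it is a prefix of some tail starting inside the list
theorem infix_iff_prefix_drop {kw cs : List Char} (hkw : kw ≠ []) :
    kw <:+: cs ↔ ∃ i < cs.length, kw.isPrefixOf (cs.drop i) := by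
  constructor
  · rintro ⟨p, t, rfl⟩
    refine ⟨p.length, ?_, ?_⟩
    · have : 0 < kw.length := List.length_pos_iff.mpr hkw
      simp [List.length_append]; omega
    · rw [List.append_assoc, List.drop_left]
      exact List.isPrefixOf_iff_prefix.mpr ⟨t, rfl⟩
  · rintro ⟨i, _, hp⟩
    exact ((List.isPrefixOf_iff_prefix.mp hp).isInfix).trans (List.drop_suffix i cs).isInfix

-- the per-description tests of A and B agree
theorem anyKeyword_eq_hasLocationKeyword (s : String) :
    locationKeywordsA.any (fun keyword => PySem.Str.isIn keyword s) = hasLocationKeyword s := by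
  have hne : ∀ kw ∈ locationKeywordsA, kw.toList ≠ [] := by decide
  apply Bool.eq_iff_iff.mpr
  simp only [hasLocationKeyword, List.any_eq_true, List.mem_range]
  constructor
  · rintro ⟨kw, hmem, hin⟩
    have hinf : kw.toList <:+: s.toList := (PySem.Str.isIn_iff_infix kw s).mp hin
    obtain ⟨i, hi, hp⟩ := (infix_iff_prefix_drop (hne kw hmem)).mp hinf
    exact ⟨i, hi, kw, hmem, hp⟩
  · rintro ⟨i, hi, kw, hmem, hp⟩
    refine ⟨kw, hmem, ?_⟩
    have hinf : kw.toList <:+: s.toList :=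
      (infix_iff_prefix_drop (hne kw hmem)).mpr ⟨i, hi, hp⟩
    exact (PySem.Str.isIn_iff_infix kw s).mpr hinf

theorem ports_agree (labels : List (List (String × String))) :
    extract_location_from_labels labels = extract_location_from_labels_alt labels := by
  induction labels with
  | nil => rfl
  | cons label rest ih =>
    simp only [extract_location_from_labels, extract_location_from_labels_alt,
      anyKeyword_eq_hasLocationKeyword, List.map_cons, List.find?_cons]
    by_cases h : hasLocationKeyword (loweredDescription label)
    · simp [loweredDescription] at h ⊢
      simp [h]
    · simp [loweredDescription] at h ⊢
      simp [h, ih, extract_location_from_labels_alt]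

-- ===== VERDICT (by name: the statement is the Claim_ definition above) =====
theorem extract_location_from_labels_spec : Claim_equal_extract_location_from_labels := by
  intro labels _
  exact ports_agree labels
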